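-- pv_equiv track=rewrite | github.com/open-energy-transition/plexos-to-pypsa-converter | src/network/investment/periods.py | _order_representatives
-- ===== SOURCE A (Python) =====
-- from collections.abc import Callable, Iterable, Mapping, Sequence
--
-- def _order_representatives(
--     names: Iterable[str],
--     representative_order: Sequence[str] | None,
-- ) -> list[str]:
--     ordered: list[str] = []
--     seen: set[str] = set()
--
--     if representative_order:
--         for name in representative_order:
--             if name in names and name not in seen:
--                 ordered.append(name)
--                 seen.add(name)
--
--     for name in sorted(names):
--         if name not in seen:
--             ordered.append(name)
--             seen.add(name)
--
--     return ordered
-- ===== SOURCE B (Python) =====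
-- def _order_representatives(names, representative_order):
--     rank = {}
--     for n in (representative_order or []):
--         if n in names and n not in rank:
--             rank[n] = len(rank)
--     missing = len(rank)
--     return sorted(set(names), key=lambda n: (rank.get(n, missing), n))
-- ===== Notes on version B (the rewrite author's own statement) =====
-- stated objective: idiomatic
-- what changed: B replaces A's two appending passes over a shared seen-set (ordered insert loop + sorted-scan loop) by building a first-occurrence rank dictionary and returning one keyed sort of the distinct names with key (rank.get(n, len(rank)), n).
import Mathlib
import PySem

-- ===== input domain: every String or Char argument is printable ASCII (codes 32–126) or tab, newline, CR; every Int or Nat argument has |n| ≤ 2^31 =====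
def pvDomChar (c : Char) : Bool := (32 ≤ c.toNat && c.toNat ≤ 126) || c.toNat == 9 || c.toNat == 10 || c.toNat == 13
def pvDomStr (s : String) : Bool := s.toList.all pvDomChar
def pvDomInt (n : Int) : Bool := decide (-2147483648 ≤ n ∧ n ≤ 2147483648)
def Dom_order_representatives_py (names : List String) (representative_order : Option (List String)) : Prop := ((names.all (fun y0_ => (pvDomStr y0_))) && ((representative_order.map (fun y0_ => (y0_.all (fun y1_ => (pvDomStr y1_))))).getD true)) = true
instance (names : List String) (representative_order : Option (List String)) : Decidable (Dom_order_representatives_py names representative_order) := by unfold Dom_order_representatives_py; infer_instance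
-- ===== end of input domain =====

-- B replaces A's two appending passes over a shared `seen` set by a first-occurrence rank
-- dictionary plus a single keyed sort of the distinct names (objective: alternative/idiomatic).

-- ===== PORT A =====
def order_representatives_py (names : List String) (representative_order : Option (List String)) : List String :=
  -- ordered = []; seen = set()
  let p0 : List String × PySem.Set String := ([], PySem.Set.empty)
  -- if representative_order: for name in representative_order: ...
  let p1 : List String × PySem.Set String :=
    match representative_order with
    | none => p0
    | some ro =>
        ro.foldl (fun p name =>
          if names.contains name && !(PySem.Set.contains p.2 name) then
            (p.1 ++ [name], PySem.Set.add p.2 name)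
          else p) p0
  -- for name in sorted(names): ...
  let p2 : List String × PySem.Set String :=
    (PySem.List.sorted names (fun x => x) false).foldl (fun p name =>
      if !(PySem.Set.contains p.2 name) then
        (p.1 ++ [name], PySem.Set.add p.2 name)
      else p) p1
  p2.1

-- ===== PORT B =====
def order_representatives_py_alt (names : List String) (representative_order : Option (List String)) : List String :=
  -- rank = {}; for n in (representative_order or []): if n in names and n not in rank: rank[n] = len(rank)
  let rank : PySem.Dict String Int :=
    (representative_order.getD []).foldl (fun d n =>
      if names.contains n && !(PySem.Dict.contains d n) then
        PySem.Dict.insert d n ((d.items.length : Int))   -- len(rank)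
      else d) PySem.Dict.empty
  -- missing = len(rank)
  let missing : Int := (rank.items.length : Int)
  -- return sorted(set(names), key=lambda n: (rank.get(n, missing), n))
  PySem.List.sorted2 (PySem.Set.ofList names) (fun n => PySem.Dict.getD rank n missing) (fun n => n) false

-- ===== PRECONDITION & SPEC =====
def Spec_order_representatives_py (names : List String) (representative_order : Option (List String)) (out : List String) : Prop := out = order_representatives_py_alt names representative_order
instance (names : List String) (representative_order : Option (List String)) (out : List String) : Decidable (Spec_order_representatives_py names representative_order out) := by unfold Spec_order_representatives_py; infer_instance

-- ===== CLAIM (what is proved, stated in full; the proofs are below) =====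
def Claim_equal_order_representatives_py : Prop := ∀ (names : List String) (representative_order : Option (List String)), Dom_order_representatives_py names representative_order → Spec_order_representatives_py names representative_order (order_representatives_py names representative_order)

-- ===== LEMMAS AND PROOFS =====

theorem mem_of_contains_eq {l : List String} {n : String} (h : l.contains n = true) : n ∈ l := by
  simpa using h

theorem not_mem_of_contains_eq {l : List String} {n : String} (h : l.contains n = false) : n ∉ l := by
  simpa using h

theorem contains_eq_false {l : List String} {n : String} (h : n ∉ l) : l.contains n = false := by
  cases hc : l.contains n
  · rfl
  · exact absurd (mem_of_contains_eq hc) h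

theorem cond_and_not (names l : List String) (n : String)
    (h : (names.contains n && !(l.contains n)) = true) : n ∈ names ∧ n ∉ l := by
  constructor
  · cases hna : names.contains n
    · rw [hna] at h; simp at h
    · exact mem_of_contains_eq hna
  · intro hmem
    have hc : l.contains n = true := by simpa using hmem
    rw [hc] at h; simp at h

theorem nodup_append_singleton {l : List String} {n : String} (hl : l.Nodup) (hn : n ∉ l) :
    (l ++ [n]).Nodup := by
  rw [List.nodup_append]
  refine ⟨hl, List.nodup_singleton n, ?_⟩
  intro a ha b hb
  rw [List.mem_singleton] at hb
  subst hb
  exact fun hh => hn (hh ▸ ha)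

-- A's first loop, with the (ordered, seen) pair collapsed to the single list it carries.
def foldA (names : List String) (l : List String) (m : List String) : List String :=
  m.foldl (fun t n => if names.contains n && !(t.contains n) then t ++ [n] else t) l

-- The elements A's second loop appends: first occurrences of m not already in l.
def newE : List String → List String → List String
  | _, [] => []
  | l, n :: m => if l.contains n then newE l m else n :: newE (l ++ [n]) m

-- The association list B's rank dict holds: R's elements paired with k, k+1, …
def rnk : List String → Int → List (String × Int)
  | [], _ => []
  | n :: R, k => (n, k) :: rnk R (k + 1)

-- first-match lookup in an association list (what Dict.getD does on the items)
def lk (items : List (String × Int)) (n : String) (d : Int) : Int :=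
  ((items.find? (fun p => p.1 == n)).map Prod.snd).getD d

theorem getD_eq_lk (items : List (String × Int)) (n : String) (d : Int) :
    PySem.Dict.getD ⟨items⟩ n d = lk items n d := rfl

-- collapse of a (list, seen-set) fold whose guard implies freshness
theorem foldl_diag (c : List String → String → Bool)
    (hc : ∀ l n, c l n = true → l.contains n = false)
    (m : List String) : ∀ l : List String,
    m.foldl (fun (p : List String × PySem.Set String) n =>
        if c p.2 n then (p.1 ++ [n], PySem.Set.add p.2 n) else p) (l, l)
      = (m.foldl (fun t n => if c t n then t ++ [n] else t) l,
         m.foldl (fun t n => if c t n then t ++ [n] else t) l) := by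
  induction m with
  | nil => intro l; rfl
  | cons n m ih =>
    intro l
    simp only [List.foldl_cons]
    by_cases h : c l n = true
    · have hf : l.contains n = false := hc l n h
      have hadd : PySem.Set.add l n = l ++ [n] := by
        rw [PySem.Set.add, PySem.Set.contains, hf]
        simp
      simp only [h, if_true, hadd]
      exact ih (l ++ [n])
    · simp only [if_neg h]
      exact ih l

theorem loop2_eq_append (m : List String) : ∀ l : List String,
    m.foldl (fun t n => if !(t.contains n) then t ++ [n] else t) l = l ++ newE l m := by
  induction m with
  | nil => intro l; simp [newE]
  | cons n m ih =>
    intro l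
    rw [List.foldl_cons]
    by_cases h : l.contains n = true
    · rw [if_neg (by simpa using mem_of_contains_eq h), newE, if_pos h]
      exact ih l
    · have h' : l.contains n = false := by simpa using h
      rw [if_pos (by simpa using not_mem_of_contains_eq h'), newE, if_neg h,
        ih (l ++ [n]), List.append_assoc]
      rfl

-- A's result, in closed form
theorem portA_closed (names : List String) (ro : Option (List String)) :
    order_representatives_py names ro =
      foldA names [] (ro.getD []) ++
        newE (foldA names [] (ro.getD []))
          (PySem.List.sorted names (fun x => x) false) := by
  have hc1 : ∀ (l : List String) (n : String),
      (names.contains n && !(l.contains n)) = true → l.contains n = false :=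
    fun l n h => contains_eq_false (cond_and_not names l n h).2
  have hc2 : ∀ (l : List String) (n : String), (!(l.contains n)) = true → l.contains n = false := by
    intro l n h; simpa using h
  cases ro with
  | none =>
    simp only [order_representatives_py]
    have h2 : ((PySem.List.sorted names (fun x => x) false).foldl
          (fun (p : List String × PySem.Set String) name =>
            if !(PySem.Set.contains p.2 name) then (p.1 ++ [name], PySem.Set.add p.2 name) else p)
          ([], PySem.Set.empty))
        = (([] : List String) ++ newE [] (PySem.List.sorted names (fun x => x) false),
           ([] : List String) ++ newE [] (PySem.List.sorted names (fun x => x) false)) :=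
      (foldl_diag (c := fun t n => !(t.contains n)) hc2 _ []).trans
        (congrArg₂ Prod.mk (loop2_eq_append _ []) (loop2_eq_append _ []))
    rw [h2]
    rfl
  | some l =>
    simp only [order_representatives_py]
    have h1 : (l.foldl (fun (p : List String × PySem.Set String) name =>
          if names.contains name && !(PySem.Set.contains p.2 name) then
            (p.1 ++ [name], PySem.Set.add p.2 name) else p) ([], PySem.Set.empty))
        = (foldA names [] l, foldA names [] l) :=
      foldl_diag (c := fun t n => names.contains n && !(t.contains n)) hc1 l []
    rw [h1]
    have h2 : ((PySem.List.sorted names (fun x => x) false).foldl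
          (fun (p : List String × PySem.Set String) name =>
            if !(PySem.Set.contains p.2 name) then (p.1 ++ [name], PySem.Set.add p.2 name) else p)
          (foldA names [] l, foldA names [] l))
        = (foldA names [] l ++ newE (foldA names [] l) (PySem.List.sorted names (fun x => x) false),
           foldA names [] l ++ newE (foldA names [] l) (PySem.List.sorted names (fun x => x) false)) :=
      (foldl_diag (c := fun t n => !(t.contains n)) hc2 _ (foldA names [] l)).trans
        (congrArg₂ Prod.mk (loop2_eq_append _ _) (loop2_eq_append _ _))
    rw [h2]
    rfl

-- properties of foldA
theorem foldA_nodup (names : List String) (m : List String) : ∀ l : List String,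
    l.Nodup → (foldA names l m).Nodup := by
  induction m with
  | nil => intro l h; simpa [foldA] using h
  | cons n m ih =>
    intro l hl
    by_cases h : (names.contains n && !(l.contains n)) = true
    · have hn : n ∉ l := (cond_and_not names l n h).2
      simp only [foldA, List.foldl_cons, h, if_true]
      exact ih (l ++ [n]) (nodup_append_singleton hl hn)
    · simp only [foldA, List.foldl_cons]
      rw [if_neg h]
      exact ih l hl

theorem foldA_mem (names : List String) (m : List String) : ∀ l : List String,
    (∀ x ∈ l, x ∈ names) → ∀ x ∈ foldA names l m, x ∈ names := by
  induction m with
  | nil => intro l hl; simpa [foldA] using hl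
  | cons n m ih =>
    intro l hl
    by_cases h : (names.contains n && !(l.contains n)) = true
    · have hn : n ∈ names := (cond_and_not names l n h).1
      simp only [foldA, List.foldl_cons, h, if_true]
      refine ih (l ++ [n]) ?_
      intro x hx
      rcases List.mem_append.mp hx with hx | hx
      · exact hl x hx
      · rw [List.mem_singleton] at hx
        exact hx ▸ hn
    · simp only [foldA, List.foldl_cons]
      rw [if_neg h]
      exact ih l hl

-- properties of newE
theorem mem_newE (m : List String) : ∀ l x, x ∈ newE l m → x ∈ m ∧ x ∉ l := by
  induction m with
  | nil => intro l x h; simp [newE] at h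
  | cons n m ih =>
    intro l x h
    by_cases hc : l.contains n = true
    · rw [newE, if_pos hc] at h
      rcases ih l x h with ⟨h1, h2⟩
      exact ⟨List.mem_cons_of_mem _ h1, h2⟩
    · rw [newE, if_neg hc] at h
      rcases List.mem_cons.mp h with rfl | h
      · exact ⟨List.mem_cons_self, not_mem_of_contains_eq (by simpa using hc)⟩
      · rcases ih (l ++ [n]) x h with ⟨h1, h2⟩
        exact ⟨List.mem_cons_of_mem _ h1, fun hx => h2 (List.mem_append.mpr (Or.inl hx))⟩

theorem newE_complete (m : List String) : ∀ l x, x ∈ m → x ∈ l ++ newE l m := by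
  induction m with
  | nil => intro l x h; simp at h
  | cons n m ih =>
    intro l x h
    by_cases hc : l.contains n = true
    · rw [newE, if_pos hc]
      rcases List.mem_cons.mp h with rfl | h
      · exact List.mem_append.mpr (Or.inl (mem_of_contains_eq hc))
      · exact ih l x h
    · rw [newE, if_neg hc]
      rcases List.mem_cons.mp h with rfl | h
      · exact List.mem_append.mpr (Or.inr List.mem_cons_self)
      · have := ih (l ++ [n]) x h
        rcases List.mem_append.mp this with h' | h'
        · rcases List.mem_append.mp h' with h'' | h''
          · exact List.mem_append.mpr (Or.inl h'')
          · rw [List.mem_singleton] at h''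
            exact List.mem_append.mpr (Or.inr (h'' ▸ List.mem_cons_self))
        · exact List.mem_append.mpr (Or.inr (List.mem_cons_of_mem _ h'))

theorem nodup_append_newE (m : List String) : ∀ l : List String,
    l.Nodup → (l ++ newE l m).Nodup := by
  induction m with
  | nil => intro l h; simpa [newE] using h
  | cons n m ih =>
    intro l hl
    by_cases hc : l.contains n = true
    · rw [newE, if_pos hc]; exact ih l hl
    · rw [newE, if_neg hc]
      have hn : n ∉ l := not_mem_of_contains_eq (by simpa using hc)
      have := ih (l ++ [n]) (nodup_append_singleton hl hn)
      simpa [List.append_assoc] using this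

theorem pairwise_newE (m : List String) (hm : m.Pairwise (· ≤ ·)) :
    ∀ l : List String, (newE l m).Pairwise (fun a b : String => a < b) := by
  induction m with
  | nil => intro l; simp [newE]
  | cons n m ih =>
    rcases List.pairwise_cons.mp hm with ⟨hhead, htail⟩
    intro l
    by_cases hc : l.contains n = true
    · rw [newE, if_pos hc]; exact ih htail l
    · rw [newE, if_neg hc]
      refine List.pairwise_cons.mpr ⟨?_, ih htail (l ++ [n])⟩
      intro b hb
      rcases mem_newE m (l ++ [n]) b hb with ⟨hbm, hbl⟩
      have hne : b ≠ n := fun h => hbl (by simp [h])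
      exact lt_of_le_of_ne (hhead b hbm) (Ne.symm hne)

-- properties of rnk
theorem rnk_length (R : List String) : ∀ k, (rnk R k).length = R.length := by
  induction R with
  | nil => intro k; rfl
  | cons n R ih => intro k; simp [rnk, ih]

theorem rnk_append (R : List String) (n : String) : ∀ k,
    rnk (R ++ [n]) k = rnk R k ++ [(n, k + (R.length : Int))] := by
  induction R with
  | nil => intro k; simp [rnk]
  | cons a R ih =>
    intro k
    simp only [List.cons_append, rnk, ih (k + 1), List.length_cons]
    have : k + 1 + (R.length : Int) = k + ((R.length + 1 : Nat) : Int) := by push_cast; ring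
    rw [this]

theorem rnk_keys_any (l : List String) : ∀ k n,
    ((rnk l k).any (fun p => p.1 == n)) = l.contains n := by
  induction l with
  | nil => intro k n; rfl
  | cons a l ih =>
    intro k n
    by_cases h : a = n
    · subst h
      simp [rnk]
    · simp [rnk, List.any_cons, ih (k + 1), h, Ne.symm h]

theorem find_rnk_of_not_mem (R : List String) : ∀ k n, n ∉ R →
    (rnk R k).find? (fun p => p.1 == n) = none := by
  induction R with
  | nil => intro k n _; rfl
  | cons a R ih =>
    intro k n h
    have h1 : a ≠ n := fun hh => h (hh ▸ List.mem_cons_self)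
    rw [rnk, List.find?_cons_of_neg (by simp [h1])]
    exact ih (k + 1) n (fun hh => h (List.mem_cons_of_mem _ hh))

theorem lk_of_not_mem (R : List String) (k : Int) (n : String) (d : Int) (h : n ∉ R) :
    lk (rnk R k) n d = d := by
  simp [lk, find_rnk_of_not_mem R k n h]

theorem find_rnk_bounds (R : List String) : ∀ k n, n ∈ R →
    ∃ v, (rnk R k).find? (fun p => p.1 == n) = some (n, v) ∧ k ≤ v ∧ v < k + (R.length : Int) := by
  induction R with
  | nil => intro k n h; simp at h
  | cons a R ih =>
    intro k n h
    by_cases he : a = n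
    · subst he
      refine ⟨k, by simp [rnk], le_refl k, ?_⟩
      simp only [List.length_cons]
      push_cast
      omega
    · have hn : n ∈ R := by
        rcases List.mem_cons.mp h with h' | h'
        · exact absurd h'.symm he
        · exact h'
      rcases ih (k + 1) n hn with ⟨v, hf, hv1, hv2⟩
      refine ⟨v, ?_, by omega, ?_⟩
      · rw [rnk, List.find?_cons_of_neg (by simp [he])]
        exact hf
      · simp only [List.length_cons]
        push_cast
        omega

theorem lk_bounds (R : List String) (n : String) (d : Int) (h : n ∈ R) :
    0 ≤ lk (rnk R 0) n d ∧ lk (rnk R 0) n d < (R.length : Int) := by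
  rcases find_rnk_bounds R 0 n h with ⟨v, hf, hv1, hv2⟩
  simp only [lk, hf, Option.map_some, Option.getD_some]
  constructor
  · exact hv1
  · omega

theorem pairwise_lk (R : List String) (d : Int) (hR : R.Nodup) : ∀ k,
    R.Pairwise (fun a b => lk (rnk R k) a d < lk (rnk R k) b d) := by
  induction R with
  | nil => intro k; simp
  | cons n R ih =>
    rcases List.nodup_cons.mp hR with ⟨hn, hR'⟩
    intro k
    have hskip : ∀ x, n ≠ x → lk (rnk (n :: R) k) x d = lk (rnk R (k + 1)) x d := by
      intro x hx
      simp only [lk, rnk]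
      rw [List.find?_cons_of_neg (by simp [hx])]
    refine List.pairwise_cons.mpr ⟨?_, ?_⟩
    · intro b hb
      have hbn : n ≠ b := fun h => hn (h ▸ hb)
      have h1 : lk (rnk (n :: R) k) n d = k := by simp [rnk, lk]
      rcases find_rnk_bounds R (k + 1) b hb with ⟨v, hf, hv1, _⟩
      rw [h1, hskip b hbn]
      simp only [lk, hf, Option.map_some, Option.getD_some]
      omega
    · refine ((ih hR') (k + 1)).imp_of_mem ?_
      intro a b ha hb hab
      have hna : n ≠ a := fun h => hn (h ▸ ha)
      have hnb : n ≠ b := fun h => hn (h ▸ hb)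
      rw [hskip a hna, hskip b hnb]
      exact hab

-- B's rank dict holds exactly rnk of A's first-loop list
theorem rank_items (names : List String) (m : List String) : ∀ l : List String,
    (m.foldl (fun d n =>
        if names.contains n && !(PySem.Dict.contains d n) then
          PySem.Dict.insert d n ((d.items.length : Int))
        else d) ⟨rnk l 0⟩).items = rnk (foldA names l m) 0 := by
  induction m with
  | nil => intro l; simp [foldA]
  | cons n m ih =>
    intro l
    have hcont : PySem.Dict.contains (⟨rnk l 0⟩ : PySem.Dict String Int) n = l.contains n :=
      rnk_keys_any l 0 n
    by_cases h : (names.contains n && !(l.contains n)) = true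
    · have hnl : n ∉ l := (cond_and_not names l n h).2
      have hn : l.contains n = false := contains_eq_false hnl
      have hcond : (names.contains n
          && !(PySem.Dict.contains (⟨rnk l 0⟩ : PySem.Dict String Int) n)) = true := by
        rw [hcont]; exact h
      have hins : PySem.Dict.insert (⟨rnk l 0⟩ : PySem.Dict String Int) n
            (((⟨rnk l 0⟩ : PySem.Dict String Int).items.length : Int))
          = (⟨rnk (l ++ [n]) 0⟩ : PySem.Dict String Int) := by
        simp only [PySem.Dict.insert, hcont, hn, Bool.false_eq_true, if_false]
        rw [rnk_append]
        simp [rnk_length]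
      simp only [List.foldl_cons, hcond, if_true]
      have hstep : foldA names l (n :: m) = foldA names (l ++ [n]) m := by
        simp only [foldA, List.foldl_cons, h, if_true]
      rw [hstep, hins]
      exact ih (l ++ [n])
    · have hcond : (names.contains n
          && !(PySem.Dict.contains (⟨rnk l 0⟩ : PySem.Dict String Int) n)) = false := by
        rw [hcont]; simpa using h
      simp only [List.foldl_cons, hcond, Bool.false_eq_true, if_false]
      have hstep : foldA names l (n :: m) = foldA names l m := by
        simp only [foldA, List.foldl_cons]
        rw [if_neg h]
      rw [hstep]
      exact ih l

-- sorted2 with keys k1, k2 is sorted with the lexicographic key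
theorem sorted2_eq_sorted_lex {α : Type} (xs : List α) (k1 : α → Int) (k2 : α → String) :
    PySem.List.sorted2 xs k1 k2 false
      = PySem.List.sorted xs (fun x => toLex (k1 x, k2 x)) false := by
  have hfun : (fun a b => decide (k1 a < k1 b) || (!decide (k1 b < k1 a) && decide (k2 a < k2 b)))
      = (fun a b : α => decide ((fun x => toLex (k1 x, k2 x)) a < (fun x => toLex (k1 x, k2 x)) b)) := by
    funext a b
    simp only [Prod.Lex.toLex_lt_toLex]
    by_cases h1 : k1 a < k1 b
    · simp [h1]
    · by_cases h2 : k1 a = k1 b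
      · simp [h2]
      · have h3 : k1 b < k1 a := lt_of_le_of_ne (le_of_not_gt h1) (fun hh => h2 hh.symm)
        simp [h1, h2, h3]
  simp only [PySem.List.sorted2, PySem.List.sorted, Bool.false_eq_true, if_false]
  rw [hfun]

-- the main equality
theorem main_eq (names : List String) (ro : Option (List String)) :
    order_representatives_py names ro = order_representatives_py_alt names ro := by
  have hc : ∀ (l : List String) (n : String),
      (names.contains n && !(l.contains n)) = true → l.contains n = false :=
    fun l n h => contains_eq_false (cond_and_not names l n h).2
  -- abbreviations
  set ro' := ro.getD [] with hro
  set R := foldA names [] ro' with hRdef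
  set S := PySem.List.sorted names (fun x => x) false with hSdef
  -- B side: identify the rank dict
  have hitems : (ro'.foldl (fun d n =>
        if names.contains n && !(PySem.Dict.contains d n) then
          PySem.Dict.insert d n ((d.items.length : Int))
        else d) PySem.Dict.empty).items = rnk R 0 :=
    rank_items names ro' []
  have hrank : (ro'.foldl (fun d n =>
        if names.contains n && !(PySem.Dict.contains d n) then
          PySem.Dict.insert d n ((d.items.length : Int))
        else d) PySem.Dict.empty) = (⟨rnk R 0⟩ : PySem.Dict String Int) := by
    conv_lhs => rw [show (ro'.foldl (fun d n =>
        if names.contains n && !(PySem.Dict.contains d n) then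
          PySem.Dict.insert d n ((d.items.length : Int))
        else d) PySem.Dict.empty) = ⟨(ro'.foldl (fun d n =>
        if names.contains n && !(PySem.Dict.contains d n) then
          PySem.Dict.insert d n ((d.items.length : Int))
        else d) PySem.Dict.empty).items⟩ from rfl]
    rw [hitems]
  have hB : order_representatives_py_alt names ro
      = PySem.List.sorted (PySem.Set.ofList names)
          (fun n => toLex (lk (rnk R 0) n ((R.length : Int)), n)) false := by
    simp only [order_representatives_py_alt, ← hro]
    rw [hrank, sorted2_eq_sorted_lex]
    simp only [getD_eq_lk, rnk_length]
  -- A side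
  have hA : order_representatives_py names ro = R ++ newE R S := portA_closed names ro
  rw [hA, hB]
  -- facts about R
  have hRnodup : R.Nodup := foldA_nodup names ro' [] List.nodup_nil
  have hRnames : ∀ x ∈ R, x ∈ names := foldA_mem names ro' [] (by simp)
  -- the permutation
  have hperm : (R ++ newE R S).Perm (PySem.Set.ofList names) := by
    rw [List.perm_ext_iff_of_nodup (nodup_append_newE S R hRnodup) (PySem.Set.nodup_ofList names)]
    intro a
    rw [PySem.Set.mem_ofList]
    constructor
    · intro h
      rcases List.mem_append.mp h with h | h
      · exact hRnames a h
      · exact (PySem.List.mem_sorted names _ false a).mp ((mem_newE S R a h).1)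
    · intro h
      exact newE_complete S R a ((PySem.List.mem_sorted names _ false a).mpr h)
  -- the strict pairwise order of the keys
  have hpw : (R ++ newE R S).Pairwise (fun a b =>
      (fun n => toLex (lk (rnk R 0) n ((R.length : Int)), n)) a
        < (fun n => toLex (lk (rnk R 0) n ((R.length : Int)), n)) b) := by
    rw [List.pairwise_append]
    refine ⟨?_, ?_, ?_⟩
    · refine (pairwise_lk R ((R.length : Int)) hRnodup 0).imp ?_
      intro a b h
      exact Prod.Lex.toLex_lt_toLex.mpr (Or.inl h)
    · have hSpw : S.Pairwise (· ≤ ·) := by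
        have := PySem.List.sorted_pairwise names (fun x => x)
        simpa [← hSdef] using this
      refine (pairwise_newE S hSpw R).imp_of_mem ?_
      intro a b ha hb hab
      have hna : a ∉ R := (mem_newE S R a ha).2
      have hnb : b ∉ R := (mem_newE S R b hb).2
      refine Prod.Lex.toLex_lt_toLex.mpr (Or.inr ⟨?_, hab⟩)
      simp [lk_of_not_mem R 0 a _ hna, lk_of_not_mem R 0 b _ hnb]
    · intro a ha b hb
      have hka := (lk_bounds R a ((R.length : Int)) ha).2
      have hkb : lk (rnk R 0) b ((R.length : Int)) = (R.length : Int) :=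
        lk_of_not_mem R 0 b _ ((mem_newE S R b hb).2)
      refine Prod.Lex.toLex_lt_toLex.mpr (Or.inl ?_)
      rw [hkb]
      exact hka
  exact (PySem.List.sorted_eq_of_perm_of_pairwise_lt _ _ _ hperm hpw).symm

-- ===== VERDICT (by name: the statement is the Claim_ definition above) =====
theorem order_representatives_py_spec : Claim_equal_order_representatives_py := by
  intro names ro _
  unfold Spec_order_representatives_py
  exact main_eq names ro
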